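-- pv_equiv track=rewrite | github.com/wmeijer221/msc_internship | src/find_tag_co_occurrence.py | calculate_tag_occurrence_using_key
-- ===== SOURCE A (Python) =====
-- def calculate_tag_occurrence_using_key(tags: dict, key: str) -> dict:
--     """Calculates the numbers of times a tag occurs, grouped by the given key."""
--     co_occurrence = {}
--
--     for tag_id, tag in tags.items():
--         if "tag_id" not in tag:
--             continue
--
--         group = tag[key]
--         tag_id = tag["tag_id"]
--
--         try:
--             target_group = co_occurrence[group]
--         except KeyError:
--             co_occurrence[group] = {}
--             target_group = co_occurrence[group]
--
--         try:
--             target_group[tag_id] += 1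
--         except KeyError:
--             target_group[tag_id] = 1
--
--     return co_occurrence
-- ===== SOURCE B (Python) =====
-- def calculate_tag_occurrence_using_key(tags: dict, key: str) -> dict:
--     """Calculates the numbers of times a tag occurs, grouped by the given key."""
--     # Pass 1: flat tuple-keyed occurrence table.
--     counts = {}
--     for tag in tags.values():
--         if "tag_id" not in tag:
--             continue
--         pair = (tag[key], tag["tag_id"])
--         counts[pair] = counts.get(pair, 0) + 1
--     # Pass 2: regroup the flat table into the nested result.
--     result = {}
--     for (group, tag_id), n in counts.items():
--         result.setdefault(group, {})[tag_id] = n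
--     return result
-- ===== Notes on version B (the rewrite author's own statement) =====
-- stated objective: alternative
-- what changed: Replaces A's incrementally maintained nested dict-of-dicts with a single pass that increments a flat (group, tag_id)-tuple-keyed count table plus a second regrouping pass that builds the nested result from that table.
import Mathlib
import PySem

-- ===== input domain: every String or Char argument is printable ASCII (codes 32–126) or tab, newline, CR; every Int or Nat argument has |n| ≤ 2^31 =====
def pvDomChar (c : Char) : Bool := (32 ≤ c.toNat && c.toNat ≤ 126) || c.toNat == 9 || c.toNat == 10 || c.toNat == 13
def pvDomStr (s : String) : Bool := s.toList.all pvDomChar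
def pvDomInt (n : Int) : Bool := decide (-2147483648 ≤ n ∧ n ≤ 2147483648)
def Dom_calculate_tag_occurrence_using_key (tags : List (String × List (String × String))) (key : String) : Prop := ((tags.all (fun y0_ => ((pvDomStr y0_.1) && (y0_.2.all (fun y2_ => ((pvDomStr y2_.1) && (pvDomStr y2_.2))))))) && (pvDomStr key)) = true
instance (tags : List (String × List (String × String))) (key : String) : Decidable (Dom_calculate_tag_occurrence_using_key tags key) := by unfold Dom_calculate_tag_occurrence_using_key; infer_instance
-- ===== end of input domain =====

-- B replaces A's incrementally maintained nested dict with a flat (group, tag_id)-keyed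
-- count table built in one pass plus a second regrouping pass (objective: alternative).

-- ===== PORT A =====
-- A's loop body: look up group = tag[key] and tag_id = tag["tag_id"], fetch (or create
-- empty) the group's inner dict, and bump tag_id's count (try/except KeyError → match).
def pvStepA (key : String) (co : PySem.Dict String (PySem.Dict String Int))
    (p : String × List (String × String)) : PySem.Dict String (PySem.Dict String Int) :=
  let tag := PySem.Dict.ofList p.2
  if tag.contains "tag_id" then
    match tag.get? key, tag.get? "tag_id" with
    | some group, some tid =>
        let tgt := co.getD group PySem.Dict.empty
        let n : Int := match tgt.get? tid with
          | some m => m + 1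
          | none => 1
        co.insert group (tgt.insert tid n)
    | _, _ => co  -- tag[key] raises KeyError in Python: excluded by Pre_
  else co

def calculate_tag_occurrence_using_key (tags : List (String × List (String × String))) (key : String) : List (String × List (String × Int)) :=
  (((PySem.Dict.ofList tags).items.foldl (pvStepA key) PySem.Dict.empty).items.map
    (fun gp => (gp.1, gp.2.items)))

-- ===== PORT B =====
-- B pass 1: bump the flat counter at the tuple key (tag[key], tag["tag_id"]).
def pvStepB (key : String) (c : PySem.Dict (String × String) Int)
    (p : String × List (String × String)) : PySem.Dict (String × String) Int :=
  let tag := PySem.Dict.ofList p.2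
  if tag.contains "tag_id" then
    match tag.get? key, tag.get? "tag_id" with
    | some group, some tid => c.insert (group, tid) (c.getD (group, tid) 0 + 1)
    | _, _ => c  -- tag[key] raises KeyError in Python: excluded by Pre_
  else c

-- B pass 2 body: result.setdefault(group, {})[tag_id] = n
def pvRegroupStep (r : PySem.Dict String (PySem.Dict String Int))
    (q : (String × String) × Int) : PySem.Dict String (PySem.Dict String Int) :=
  r.insert q.1.1 ((r.getD q.1.1 PySem.Dict.empty).insert q.1.2 q.2)

def calculate_tag_occurrence_using_key_alt (tags : List (String × List (String × String))) (key : String) : List (String × List (String × Int)) :=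
  let counts := (PySem.Dict.ofList tags).items.foldl (pvStepB key) PySem.Dict.empty
  ((counts.items.foldl pvRegroupStep PySem.Dict.empty).items.map
    (fun gp => (gp.1, gp.2.items)))

-- ===== PRECONDITION & SPEC =====
-- Pre_ excludes exactly the inputs on which Python A raises KeyError: a row that has a
-- "tag_id" key but lacks `key`, so tag[key] raises.
def Pre_calculate_tag_occurrence_using_key (tags : List (String × List (String × String))) (key : String) : Prop :=
  ∀ tag ∈ (PySem.Dict.ofList tags).values,
    "tag_id" ∈ tag.map (·.1) → key ∈ tag.map (·.1)
instance (tags : List (String × List (String × String))) (key : String) : Decidable (Pre_calculate_tag_occurrence_using_key tags key) := by unfold Pre_calculate_tag_occurrence_using_key; infer_instance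

def pvWitness_calculate_tag_occurrence_using_key : (List (String × List (String × String))) × String :=
  ([("1", [("tag_id", "a"), ("lang", "py")]), ("2", [("tag_id", "b"), ("lang", "py")]),
    ("3", [("tag_id", "a"), ("lang", "py")]), ("4", [("note", "x")])], "lang")

def Spec_calculate_tag_occurrence_using_key (tags : List (String × List (String × String))) (key : String) (out : List (String × List (String × Int))) : Prop := out = calculate_tag_occurrence_using_key_alt tags key
instance (tags : List (String × List (String × String))) (key : String) (out : List (String × List (String × Int))) : Decidable (Spec_calculate_tag_occurrence_using_key tags key out) := by unfold Spec_calculate_tag_occurrence_using_key; infer_instance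

-- ===== CLAIM (what is proved, stated in full; the proofs are below) =====
def Claim_equal_calculate_tag_occurrence_using_key : Prop := ∀ (tags : List (String × List (String × String))) (key : String), Dom_calculate_tag_occurrence_using_key tags key → Pre_calculate_tag_occurrence_using_key tags key → Spec_calculate_tag_occurrence_using_key tags key (calculate_tag_occurrence_using_key tags key)

-- ===== LEMMAS AND PROOFS =====

-- abbreviation for B's regroup fold from an arbitrary accumulator (proof-only)
def pvRegroupFrom (r : PySem.Dict String (PySem.Dict String Int))
    (l : List ((String × String) × Int)) : PySem.Dict String (PySem.Dict String Int) :=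
  l.foldl pvRegroupStep r

theorem pv_insert_comm_of_contains {κ ν : Type} [BEq κ] [LawfulBEq κ]
    (d : PySem.Dict κ ν) (g g' : κ) (A B : ν)
    (h : d.contains g = true) (hne : g ≠ g') :
    (d.insert g A).insert g' B = (d.insert g' B).insert g A := by
  have hgg' : (g' == g) = false := by simp [Ne.symm hne]
  have hg'g : (g == g') = false := by simp [hne]
  apply PySem.Dict.ext
  by_cases hg' : d.contains g' = true
  · rw [PySem.Dict.items_insert_of_contains _ B (by simp [PySem.Dict.contains_insert, hg']),
        PySem.Dict.items_insert_of_contains _ A h,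
        PySem.Dict.items_insert_of_contains _ A (by simp [PySem.Dict.contains_insert, h]),
        PySem.Dict.items_insert_of_contains _ B hg']
    rw [List.map_map, List.map_map]
    apply List.map_congr_left
    intro p _
    simp only [Function.comp_apply]
    by_cases hp : p.1 == g
    · simp [eq_of_beq hp, hg'g]
    · by_cases hp' : p.1 == g' <;> simp [hp, hp', hgg']
  · have hg'f : d.contains g' = false := by simpa using hg'
    rw [PySem.Dict.items_insert_of_not_contains _ B (by simp [PySem.Dict.contains_insert, hg'f, hgg']),
        PySem.Dict.items_insert_of_contains _ A h,
        PySem.Dict.items_insert_of_contains _ A (by simp [PySem.Dict.contains_insert, h]),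
        PySem.Dict.items_insert_of_not_contains _ B hg'f]
    rw [List.map_append]
    simp [hgg']

theorem pvRegroupFrom_append (r : PySem.Dict String (PySem.Dict String Int))
    (l1 l2 : List ((String × String) × Int)) :
    pvRegroupFrom r (l1 ++ l2) = pvRegroupFrom (pvRegroupFrom r l1) l2 :=
  List.foldl_append

theorem pvRegroupFrom_cons (r : PySem.Dict String (PySem.Dict String Int))
    (x : (String × String) × Int) (l : List ((String × String) × Int)) :
    pvRegroupFrom r (x :: l) = pvRegroupFrom (pvRegroupStep r x) l := rfl

theorem pv_late_overwrite (l : List ((String × String) × Int))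
    (r : PySem.Dict String (PySem.Dict String Int)) (g t : String) (w : Int)
    (hnl : (g, t) ∉ l.map (·.1))
    (hg : r.contains g = true)
    (ht : (r.getD g PySem.Dict.empty).contains t = true) :
    pvRegroupFrom (r.insert g ((r.getD g PySem.Dict.empty).insert t w)) l
      = (pvRegroupFrom r l).insert g
          (((pvRegroupFrom r l).getD g PySem.Dict.empty).insert t w) := by
  induction l generalizing r with
  | nil => rfl
  | cons x l ih =>
    obtain ⟨⟨g', t'⟩, v⟩ := x
    simp only [List.map_cons, List.mem_cons, not_or] at hnl
    obtain ⟨hx, hnl'⟩ := hnl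
    rw [pvRegroupFrom_cons, pvRegroupFrom_cons]
    by_cases hgg : g' = g
    · subst hgg
      have htt : t' ≠ t := fun h => hx (by simp [h])
      have key : pvRegroupStep (r.insert g' ((r.getD g' PySem.Dict.empty).insert t w)) ((g', t'), v)
          = (pvRegroupStep r ((g', t'), v)).insert g'
              (((pvRegroupStep r ((g', t'), v)).getD g' PySem.Dict.empty).insert t w) := by
        simp only [pvRegroupStep]
        rw [PySem.Dict.getD_insert_self, PySem.Dict.insert_insert_self,
            PySem.Dict.getD_insert_self, PySem.Dict.insert_insert_self,
            pv_insert_comm_of_contains _ t t' w v ht (Ne.symm htt)]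
      rw [key, ih _ hnl' (by simp [pvRegroupStep, PySem.Dict.contains_insert_self])
            (by simp only [pvRegroupStep, PySem.Dict.getD_insert_self]
                simp [PySem.Dict.contains_insert, ht])]
    · have key : pvRegroupStep (r.insert g ((r.getD g PySem.Dict.empty).insert t w)) ((g', t'), v)
          = (pvRegroupStep r ((g', t'), v)).insert g
              (((pvRegroupStep r ((g', t'), v)).getD g PySem.Dict.empty).insert t w) := by
        simp only [pvRegroupStep]
        rw [PySem.Dict.getD_insert_of_ne _ _ _ hgg,
            PySem.Dict.getD_insert_of_ne _ _ _ (fun h => hgg h.symm),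
            pv_insert_comm_of_contains _ g g' _ _ hg (fun h => hgg h.symm)]
      rw [key, ih _ hnl' (by simp [pvRegroupStep, PySem.Dict.contains_insert, hg])
            (by simp only [pvRegroupStep]
                rw [PySem.Dict.getD_insert_of_ne _ _ _ (fun h => hgg h.symm)]
                exact ht)]

theorem pv_regroup_get (l : List ((String × String) × Int))
    (r : PySem.Dict String (PySem.Dict String Int)) (g t : String)
    (hnd : (l.map (·.1)).Nodup) :
    ((pvRegroupFrom r l).getD g PySem.Dict.empty).get? t
      = match (PySem.Dict.mk l).get? (g, t) with
        | some v => some v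
        | none => ((r.getD g PySem.Dict.empty).get? t) := by
  induction l generalizing r with
  | nil => rfl
  | cons x l ih =>
    obtain ⟨⟨g', t'⟩, v⟩ := x
    simp only [List.map_cons, List.nodup_cons] at hnd
    obtain ⟨hx, hnd'⟩ := hnd
    rw [pvRegroupFrom_cons, PySem.Dict.get?_mk_cons]
    by_cases hk : (g', t') = (g, t)
    · injection hk with h1 h2
      subst h1; subst h2
      simp only [beq_self_eq_true, if_pos]
      rw [ih _ hnd']
      have : (PySem.Dict.mk l).get? (g', t') = none := by
        rw [PySem.Dict.get?_eq_none_iff_not_mem_keys]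
        simpa using hx
      rw [this]
      simp [pvRegroupStep, PySem.Dict.getD_insert_self, PySem.Dict.get?_insert_self]
    · have hbeq : (((g', t') : String × String) == (g, t)) = false := by simp [hk]
      rw [hbeq]
      simp only [Bool.false_eq_true, if_false]
      rw [ih _ hnd']
      have hstep : ((pvRegroupStep r ((g', t'), v)).getD g PySem.Dict.empty).get? t
          = (r.getD g PySem.Dict.empty).get? t := by
        simp only [pvRegroupStep]
        by_cases hgg : g' = g
        · subst hgg
          have htt : t ≠ t' := fun h => hk (by simp [h])
          rw [PySem.Dict.getD_insert_self, PySem.Dict.get?_insert_of_ne _ _ htt]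
        · rw [PySem.Dict.getD_insert_of_ne _ _ _ (fun h => hgg h.symm)]
      rw [hstep]

theorem pv_regroup_replace (l : List ((String × String) × Int))
    (r : PySem.Dict String (PySem.Dict String Int)) (g t : String) (w : Int)
    (hnd : (l.map (·.1)).Nodup) (hmem : (g, t) ∈ l.map (·.1)) :
    pvRegroupFrom r (l.map (fun p => if p.1 == (g, t) then ((g, t), w) else p))
      = (pvRegroupFrom r l).insert g
          (((pvRegroupFrom r l).getD g PySem.Dict.empty).insert t w) := by
  induction l generalizing r with
  | nil => simp at hmem
  | cons x l ih =>
    obtain ⟨⟨g', t'⟩, v⟩ := x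
    simp only [List.map_cons, List.nodup_cons] at hnd
    obtain ⟨hxnin, hnd'⟩ := hnd
    by_cases hk : ((g', t') : String × String) = (g, t)
    · injection hk with h1 h2
      subst h1; subst h2
      have htail : l.map (fun p => if p.1 == ((g', t') : String × String) then ((g', t'), w) else p) = l := by
        calc l.map (fun p => if p.1 == ((g', t') : String × String) then ((g', t'), w) else p)
            = l.map id := List.map_congr_left (fun p hp => by
                have hne : p.1 ≠ (g', t') := fun e => hxnin (e ▸ List.mem_map_of_mem hp)
                simp [hne])
          _ = l := List.map_id l
      simp only [List.map_cons, beq_self_eq_true, if_pos]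
      rw [htail, pvRegroupFrom_cons, pvRegroupFrom_cons]
      have hstep : pvRegroupStep r ((g', t'), w)
          = (pvRegroupStep r ((g', t'), v)).insert g'
              (((pvRegroupStep r ((g', t'), v)).getD g' PySem.Dict.empty).insert t' w) := by
        simp only [pvRegroupStep]
        rw [PySem.Dict.getD_insert_self, PySem.Dict.insert_insert_self,
            PySem.Dict.insert_insert_self]
      rw [hstep, pv_late_overwrite l _ g' t' w hxnin
            (by simp [pvRegroupStep, PySem.Dict.contains_insert_self])
            (by simp only [pvRegroupStep, PySem.Dict.getD_insert_self]
                exact PySem.Dict.contains_insert_self _ _ _)]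
    · have hbeq : (((g', t') : String × String) == (g, t)) = false := by simp [hk]
      have hmem' : ((g, t) : String × String) ∈ l.map (·.1) := by
        rcases (List.mem_cons).mp hmem with h | h
        · exact absurd h.symm hk
        · exact h
      simp only [List.map_cons, hbeq]
      simp only [Bool.false_eq_true, if_false]
      rw [pvRegroupFrom_cons, pvRegroupFrom_cons]
      exact ih _ hnd' hmem'

theorem pv_regroup_bump (c : PySem.Dict (String × String) Int) (g t : String)
    (hnd : c.keys.Nodup) :
    pvRegroupFrom PySem.Dict.empty (c.insert (g, t) (c.getD (g, t) 0 + 1)).items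
      = (pvRegroupFrom PySem.Dict.empty c.items).insert g
          (((pvRegroupFrom PySem.Dict.empty c.items).getD g PySem.Dict.empty).insert t
            (((pvRegroupFrom PySem.Dict.empty c.items).getD g PySem.Dict.empty).getD t 0 + 1)) := by
  have hnd' : (c.items.map (·.1)).Nodup := hnd
  have hget := pv_regroup_get c.items PySem.Dict.empty g t hnd'
  have hmk : (PySem.Dict.mk c.items).get? (g, t) = c.get? (g, t) := rfl
  rw [hmk] at hget
  by_cases hc : c.contains (g, t) = true
  · have hmem : ((g, t) : String × String) ∈ c.items.map (·.1) := by
      have := (PySem.Dict.contains_iff_mem_keys c (g, t)).mp hc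
      exact this
    rw [PySem.Dict.items_insert_of_contains _ _ hc,
        pv_regroup_replace c.items PySem.Dict.empty g t _ hnd' hmem]
    congr 2
    rcases hv : c.get? (g, t) with _ | v
    · rw [(PySem.Dict.get?_eq_none_iff_contains c (g, t)).mp hv] at hc; cases hc
    · rw [PySem.Dict.getD_of_get?_eq_some _ _ hv]
      rw [hv] at hget
      rw [PySem.Dict.getD_of_get?_eq_some _ _ hget]
  · have hcf : c.contains (g, t) = false := by simpa using hc
    have hvnone : c.get? (g, t) = none := (PySem.Dict.get?_eq_none_iff_contains c (g, t)).mpr hcf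
    rw [hvnone] at hget
    simp only [PySem.Dict.getD_empty, PySem.Dict.get?_empty] at hget
    have hgetD0 : ((pvRegroupFrom PySem.Dict.empty c.items).getD g PySem.Dict.empty).getD t 0 = 0 :=
      PySem.Dict.getD_of_get?_eq_none _ _ hget
    rw [PySem.Dict.items_insert_of_not_contains _ _ hcf,
        PySem.Dict.getD_of_not_contains _ _ hcf,
        pvRegroupFrom_append, hgetD0]
    rfl

theorem pv_main_loop (l : List (String × List (String × String))) (key : String)
    (c : PySem.Dict (String × String) Int) (a : PySem.Dict String (PySem.Dict String Int))
    (hnd : c.keys.Nodup)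
    (hinv : pvRegroupFrom PySem.Dict.empty c.items = a) :
    pvRegroupFrom PySem.Dict.empty (l.foldl (pvStepB key) c).items
      = l.foldl (pvStepA key) a := by
  induction l generalizing c a with
  | nil => exact hinv
  | cons p l ih =>
    simp only [List.foldl_cons]
    by_cases htid : (PySem.Dict.ofList p.2).contains "tag_id" = true
    · cases hk : (PySem.Dict.ofList p.2).get? key with
      | none =>
          cases ht : (PySem.Dict.ofList p.2).get? "tag_id" with
          | none => simp only [pvStepB, pvStepA, htid, if_pos, hk, ht]; exact ih c a hnd hinv
          | some tid => simp only [pvStepB, pvStepA, htid, if_pos, hk, ht]; exact ih c a hnd hinv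
      | some g =>
          cases ht : (PySem.Dict.ofList p.2).get? "tag_id" with
          | none => simp only [pvStepB, pvStepA, htid, if_pos, hk, ht]; exact ih c a hnd hinv
          | some tid =>
              simp only [pvStepB, pvStepA, htid, if_pos, hk, ht]
              apply ih
              · exact PySem.Dict.nodup_keys_insert _ _ _ hnd
              · subst hinv
                rw [pv_regroup_bump c g tid hnd]
                congr 2
                rcases hgt : ((pvRegroupFrom PySem.Dict.empty c.items).getD g PySem.Dict.empty).get? tid with _ | m
                · rw [PySem.Dict.getD_of_get?_eq_none _ _ hgt]; simp
                · rw [PySem.Dict.getD_of_get?_eq_some _ _ hgt]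
    · simp only [pvStepB, pvStepA, htid]
      simp only [Bool.false_eq_true, if_false]
      exact ih c a hnd hinv

-- ===== VERDICT (by name: the statement is the Claim_ definition above) =====
theorem calculate_tag_occurrence_using_key_spec : Claim_equal_calculate_tag_occurrence_using_key := by
  intro tags key _ _
  have h := pv_main_loop (PySem.Dict.ofList tags).items key PySem.Dict.empty PySem.Dict.empty (by simp [pysem]) rfl
  unfold pvRegroupFrom at h
  simp only [Spec_calculate_tag_occurrence_using_key, calculate_tag_occurrence_using_key,
    calculate_tag_occurrence_using_key_alt]
  rw [h]
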